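-- pv_equiv track=rewrite | github.com/geekatron/jerry | scripts/transform_agents.py | _fix_mixed_yaml
-- ===== SOURCE A (Python) =====
-- def _fix_mixed_yaml(text):
--     """Fix invalid YAML where array items and mapping keys are mixed.
--
--     Transcript agents have input_validation blocks like:
--         input_validation:
--           - pattern: "..."
--             enforcement: hard
--             rationale: "..."
--           key: value  # <-- invalid: mixing array and mapping
--
--     This removes the array items so the block parses as a pure mapping.
--     """
--     lines = text.splitlines()
--     out = []
--     skip = False
--     for line in lines:
--         stripped = line.lstrip()
--         if skip:
--             # Skip continuation lines of the array item (deeper indent)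
--             if stripped.startswith("enforcement:") or stripped.startswith("rationale:"):
--                 continue
--             skip = False
--         if stripped.startswith("- pattern:"):
--             skip = True
--             continue
--         out.append(line)
--     return "\n".join(out)
-- ===== SOURCE B (Python) =====
-- def _tag(line):
--     """Classify a line: 'P' = array-item start, 'C' = continuation key, 'O' = other."""
--     s = line.lstrip()
--     if s.startswith("- pattern:"):
--         return "P"
--     if s.startswith("enforcement:") or s.startswith("rationale:"):
--         return "C"
--     return "O"
--
--
-- def _dropped(tags, i):
--     """Stateless per-line rule: a 'P' line is dropped; a 'C' line is dropped iff
--     the maximal run of 'C' lines ending just before it is preceded by a 'P' line."""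
--     t = tags[i]
--     if t == "P":
--         return True
--     if t == "C":
--         for u in reversed(tags[:i]):
--             if u != "C":
--                 return u == "P"
--         return False
--     return False
--
--
-- def _fix_mixed_yaml(text):
--     """Two-phase: classify every line into a tag list, then keep each line by a
--     stateless predicate over the tag list (no skip flag, no stateful scan)."""
--     lines = text.splitlines()
--     tags = [_tag(l) for l in lines]
--     kept = [line for i, line in enumerate(lines) if not _dropped(tags, i)]
--     return "\n".join(kept)
-- ===== Notes on version B (the rewrite author's own statement) =====
-- stated objective: alternative
-- what changed: Replaces A's single stateful pass carrying a skip flag with a two-phase declarative approach: one pass classifies every line into a tag list (item-start / continuation / other), then each line is kept or dropped by a stateless per-line predicate that scans backwards over the tag prefix to see whether the continuation run it ends is preceded by an item-start line.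
import Mathlib
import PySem

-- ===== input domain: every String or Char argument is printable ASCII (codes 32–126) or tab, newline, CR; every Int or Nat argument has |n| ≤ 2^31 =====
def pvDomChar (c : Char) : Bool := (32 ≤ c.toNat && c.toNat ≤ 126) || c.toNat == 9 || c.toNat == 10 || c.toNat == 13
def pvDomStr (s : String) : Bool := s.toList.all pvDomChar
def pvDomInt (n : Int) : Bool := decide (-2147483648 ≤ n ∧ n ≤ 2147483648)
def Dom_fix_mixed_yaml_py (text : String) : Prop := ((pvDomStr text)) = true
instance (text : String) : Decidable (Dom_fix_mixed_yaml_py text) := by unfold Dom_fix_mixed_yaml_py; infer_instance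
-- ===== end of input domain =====

-- B replaces A's single stateful skip-flag pass by a two-phase approach: classify each
-- line into a tag list, then keep each line by a stateless predicate that scans the tag
-- prefix backwards; objective: alternative decomposition, similar cost.

-- ===== PORT A =====
-- A: single pass over splitlines with (out, skip) state, appended to out, joined.
def fix_mixed_yaml_py (text : String) : String :=
  let lines := PySem.Str.splitlines text
  let r := lines.foldl (fun (st : List String × Bool) line =>
    let stripped := PySem.Str.lstrip line
    if st.2 && (PySem.Str.startswith stripped "enforcement:" || PySem.Str.startswith stripped "rationale:") then
      st                                   -- continue (still skipping)
    else if PySem.Str.startswith stripped "- pattern:" then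
      (st.1, true)                         -- start skipping, drop this line
    else
      (st.1 ++ [line], false)) ([], false)
  PySem.Str.join "\n" r.1

-- ===== PORT B =====
-- B helper _tag: classify a line as 'P' (array-item start), 'C' (continuation), 'O' (other).
def bTag (line : String) : Char :=
  let s := PySem.Str.lstrip line
  if PySem.Str.startswith s "- pattern:" then 'P'
  else if PySem.Str.startswith s "enforcement:" || PySem.Str.startswith s "rationale:" then 'C'
  else 'O'

-- B helper: the 'for u in reversed(tags[:i])' loop of _dropped.
def bPreceded : List Char → Bool
  | [] => false
  | u :: rest => if u != 'C' then u == 'P' else bPreceded rest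

-- B helper _dropped: stateless per-line predicate over the tag list.
-- (pyGetD with default 'O' is a totality guard; _dropped is only called with i in range.)
def bDropped (tags : List Char) (i : Int) : Bool :=
  let t := PySem.List.pyGetD tags i 'O'
  if t == 'P' then true
  else if t == 'C' then bPreceded ((PySem.List.slice tags none (some i)).reverse)
  else false

def fix_mixed_yaml_py_alt (text : String) : String :=
  let lines := PySem.Str.splitlines text
  let tags := lines.map bTag
  let kept := ((PySem.List.enumerate lines 0).filter (fun p => !bDropped tags p.1)).map (·.2)
  PySem.Str.join "\n" kept

-- ===== PRECONDITION & SPEC =====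
def Spec_fix_mixed_yaml_py (text : String) (out : String) : Prop := out = fix_mixed_yaml_py_alt text
instance (text : String) (out : String) : Decidable (Spec_fix_mixed_yaml_py text out) := by unfold Spec_fix_mixed_yaml_py; infer_instance

-- ===== CLAIM (what is proved, stated in full; the proofs are below) =====
def Claim_equal_fix_mixed_yaml_py : Prop := ∀ (text : String), Dom_fix_mixed_yaml_py text → Spec_fix_mixed_yaml_py text (fix_mixed_yaml_py text)

-- ===== LEMMAS AND PROOFS =====

-- A's output suffix as a recursion over the lines with the skip flag.
def aTail : List String → Bool → List String
  | [], _ => []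
  | l :: rest, skip =>
    if skip && (PySem.Str.startswith (PySem.Str.lstrip l) "enforcement:" ||
                PySem.Str.startswith (PySem.Str.lstrip l) "rationale:") then aTail rest true
    else if PySem.Str.startswith (PySem.Str.lstrip l) "- pattern:" then aTail rest true
    else l :: aTail rest false

theorem aTail_foldl (ls : List String) :
    ∀ (out : List String) (skip : Bool),
    (ls.foldl (fun (st : List String × Bool) line =>
      let stripped := PySem.Str.lstrip line
      if st.2 && (PySem.Str.startswith stripped "enforcement:" || PySem.Str.startswith stripped "rationale:") then
        st
      else if PySem.Str.startswith stripped "- pattern:" then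
        (st.1, true)
      else
        (st.1 ++ [line], false)) (out, skip)).1 = out ++ aTail ls skip := by
  induction ls with
  | nil => intro out skip; simp [aTail]
  | cons l rest ih =>
    intro out skip
    simp only [List.foldl_cons, aTail]
    split
    · rename_i hc
      have hs : skip = true := by cases skip <;> simp_all
      subst hs
      rw [ih]
    · split
      · rw [ih]
      · rw [ih]; simp

-- Main bridge: B's filtered enumeration over a suffix equals A's aTail, where the skip
-- flag is exactly bPreceded of the reversed tag prefix.
theorem bKey (tags : List Char) : ∀ (suf : List String) (i : Nat),
    tags.drop i = suf.map bTag →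
    ((PySem.List.enumerate suf (i : Int)).filter (fun p => !bDropped tags p.1)).map (·.2)
      = aTail suf (bPreceded ((tags.take i).reverse)) := by
  intro suf
  induction suf with
  | nil => intro i _; simp [PySem.List.enumerate, aTail]
  | cons l rest ih =>
    intro i hdrop
    have hget : tags[i]? = some (bTag l) := by
      have h0 : (tags.drop i)[0]? = some (bTag l) := by rw [hdrop]; rfl
      simpa [List.getElem?_drop] using h0
    have htake : tags.take (i + 1) = tags.take i ++ [bTag l] := by
      rw [List.take_add_one, hget]; rfl
    have hdrop' : tags.drop (i + 1) = rest.map bTag := by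
      rw [← List.tail_drop, hdrop]; rfl
    have hcast : (i : Int) + 1 = ((i + 1 : Nat) : Int) := by push_cast; ring
    have hdr : bDropped tags (i : Int) =
        (if bTag l = 'P' then true
         else if bTag l = 'C' then bPreceded ((tags.take i).reverse) else false) := by
      simp [bDropped, PySem.List.pyGetD_natCast, PySem.List.slice_to_natCast, hget]
    rw [PySem.List.enumerate_cons, List.filter_cons]
    rw [hcast]
    by_cases hp : PySem.Str.startswith (PySem.Str.lstrip l) "- pattern:" = true
    · have htag : bTag l = 'P' := by simp only [bTag]; rw [if_pos hp]
      have hd : bDropped tags (i : Int) = true := by rw [hdr, htag]; simp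
      rw [hd]
      simp only [Bool.not_true, Bool.false_eq_true, if_false]
      rw [ih (i + 1) hdrop']
      have hnew : bPreceded ((tags.take (i + 1)).reverse) = true := by
        rw [htake, htag]; simp [bPreceded]
      rw [hnew]
      rw [aTail]
      by_cases hs : (bPreceded ((tags.take i).reverse) &&
          (PySem.Str.startswith (PySem.Str.lstrip l) "enforcement:" ||
           PySem.Str.startswith (PySem.Str.lstrip l) "rationale:")) = true
      · rw [if_pos hs]
      · rw [if_neg hs, if_pos hp]
    · have hp' : PySem.Str.startswith (PySem.Str.lstrip l) "- pattern:" = false := by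
        simpa using hp
      by_cases hc : (PySem.Str.startswith (PySem.Str.lstrip l) "enforcement:" ||
          PySem.Str.startswith (PySem.Str.lstrip l) "rationale:") = true
      · have htag : bTag l = 'C' := by simp only [bTag]; rw [if_neg hp, if_pos hc]
        have hd : bDropped tags (i : Int) = bPreceded ((tags.take i).reverse) := by
          rw [hdr, htag]; simp
        rw [hd]
        have hnew : bPreceded ((tags.take (i + 1)).reverse) = bPreceded ((tags.take i).reverse) := by
          rw [htake, htag]; simp [bPreceded]
        by_cases hs : bPreceded ((tags.take i).reverse) = true
        · rw [hs]
          simp only [Bool.not_true, Bool.false_eq_true, if_false]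
          rw [ih (i + 1) hdrop', hnew, hs]
          rw [aTail, if_pos (by rw [hc]; simp)]
        · have hs' : bPreceded ((tags.take i).reverse) = false := by simpa using hs
          rw [hs']
          simp only [Bool.not_false, if_true, List.map_cons]
          rw [ih (i + 1) hdrop', hnew, hs']
          rw [aTail, if_neg (by simp), if_neg hp]
      · have hc' : (PySem.Str.startswith (PySem.Str.lstrip l) "enforcement:" ||
            PySem.Str.startswith (PySem.Str.lstrip l) "rationale:") = false := by simpa using hc
        have htag : bTag l = 'O' := by simp only [bTag]; rw [if_neg hp, if_neg hc]
        have hd : bDropped tags (i : Int) = false := by rw [hdr, htag]; simp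
        rw [hd]
        simp only [Bool.not_false, if_true, List.map_cons]
        rw [ih (i + 1) hdrop']
        have hnew : bPreceded ((tags.take (i + 1)).reverse) = false := by
          rw [htake, htag]; simp [bPreceded]
        rw [hnew]
        rw [aTail, if_neg (by rw [hc']; simp), if_neg hp]

-- ===== VERDICT (by name: the statement is the Claim_ definition above) =====
theorem fix_mixed_yaml_py_spec : Claim_equal_fix_mixed_yaml_py := by
  intro text _
  unfold Spec_fix_mixed_yaml_py fix_mixed_yaml_py fix_mixed_yaml_py_alt
  simp only [aTail_foldl, List.nil_append]
  have h0 : ((PySem.Str.splitlines text).map bTag).drop 0 = (PySem.Str.splitlines text).map bTag := rfl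
  have hk := bKey ((PySem.Str.splitlines text).map bTag) (PySem.Str.splitlines text) 0 h0
  simp only [Nat.cast_zero] at hk
  rw [hk]
  simp [bPreceded]
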